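-- pv_equiv track=rewrite | github.com/avielchow/Codejam | Round C - Circuit Board.py | histogram_row_count
-- ===== SOURCE A (Python) =====
-- def histogram_row_count(row, k):
--     count = 0
--     min = row[0]
--     max = min
--     for number in row:
--         if number < min:
--             min = number
--         elif number > max:
--             max = number
--
--         if max - min > k:
--             return count
--         else:
--             count += 1
--     return count
-- ===== SOURCE B (Python) =====
-- def histogram_row_count(row, k):
--     # Phase 1: build prefix-minimum and prefix-maximum tables.
--     mins = []
--     for x in row:
--         mins.append(x if not mins else (x if x < mins[-1] else mins[-1]))
--     maxs = []
--     for x in row: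
--         maxs.append(x if not maxs else (x if x > maxs[-1] else maxs[-1]))
--     # Phase 2: first index where the prefix range exceeds k; else the length.
--     return next((i for i, (lo, hi) in enumerate(zip(mins, maxs)) if hi - lo > k),
--                 len(row))
-- ===== Notes on version B (the rewrite author's own statement) =====
-- stated objective: alternative
-- what changed: Replaces A's single fused running-min/max loop (with early return of a counter) by two phases: build prefix-min and prefix-max tables, then a separate search for the first index whose prefix range exceeds k.
-- outside the precondition, e.g. on histogram_row_count([], 0): A raises IndexError, B returns 0
import Mathlib
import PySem

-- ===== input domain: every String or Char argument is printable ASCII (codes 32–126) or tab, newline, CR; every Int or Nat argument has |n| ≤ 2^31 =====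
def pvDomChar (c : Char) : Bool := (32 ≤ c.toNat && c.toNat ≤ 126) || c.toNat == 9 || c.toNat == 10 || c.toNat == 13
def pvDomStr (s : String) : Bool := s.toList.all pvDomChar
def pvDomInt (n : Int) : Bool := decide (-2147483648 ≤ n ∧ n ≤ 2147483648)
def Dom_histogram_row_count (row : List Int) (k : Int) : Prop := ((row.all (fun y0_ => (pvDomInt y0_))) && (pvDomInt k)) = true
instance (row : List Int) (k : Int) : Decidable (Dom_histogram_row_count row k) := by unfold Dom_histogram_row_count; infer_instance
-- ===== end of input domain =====

-- B replaces A's fused running-min/max loop by prefix-min/max tables plus a first-violation search (alternative decomposition, same cost); return-value equivalence on nonempty rows (Pre_), since A raises IndexError on the empty row.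


-- ===== PORT A =====
-- A's loop: running min/max (if/elif), early return of count at the first violation.
def pvAloop (k : Int) : List Int → Int → Int → Int → Int
  | [], count, _, _ => count
  | n :: rest, count, mn, mx =>
    let mn' := if n < mn then n else mn
    let mx' := if n < mn then mx else (if n > mx then n else mx)
    if mx' - mn' > k then count else pvAloop k rest (count + 1) mn' mx'

def histogram_row_count (row : List Int) (k : Int) : Int :=
  match PySem.List.pyGet? row 0 with
  | none => 0          -- row[0] raises IndexError in Python; outside Pre_
  | some h => pvAloop k row 0 h h

-- ===== PORT B =====
-- Phase 1 of Source B: prefix tables built by appending (x if < / > last else last).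
def pvBmins (row : List Int) : List Int :=
  row.foldl (fun acc x =>
    acc ++ [match acc.getLast? with
            | none => x
            | some m => if x < m then x else m]) []

def pvBmaxs (row : List Int) : List Int :=
  row.foldl (fun acc x =>
    acc ++ [match acc.getLast? with
            | none => x
            | some m => if x > m then x else m]) []

-- Phase 2 of Source B: enumerate(zip(mins, maxs)), first i with hi - lo > k.
def pvBsearch (k : Int) : List Int → List Int → Int → Option Int
  | lo :: los, hi :: his, i =>
      if hi - lo > k then some i else pvBsearch k los his (i + 1)
  | _, _, _ => none

def histogram_row_count_alt (row : List Int) (k : Int) : Int :=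
  (pvBsearch k (pvBmins row) (pvBmaxs row) 0).getD (row.length : Int)

-- ===== PRECONDITION & SPEC =====
-- A evaluates row[0]: the empty row raises IndexError, so it is excluded.
def Pre_histogram_row_count (row : List Int) (k : Int) : Prop := row ≠ []
instance (row : List Int) (k : Int) : Decidable (Pre_histogram_row_count row k) := by
  unfold Pre_histogram_row_count; infer_instance
def pvWitness_histogram_row_count : List Int × Int := ([3, 1, 4, 1, 5], 2)

def Spec_histogram_row_count (row : List Int) (k : Int) (out : Int) : Prop := out = histogram_row_count_alt row k
instance (row : List Int) (k : Int) (out : Int) : Decidable (Spec_histogram_row_count row k out) := by unfold Spec_histogram_row_count; infer_instance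

-- ===== CLAIM (what is proved, stated in full; the proofs are below) =====
def Claim_equal_histogram_row_count : Prop := ∀ (row : List Int) (k : Int), Dom_histogram_row_count row k → Pre_histogram_row_count row k → Spec_histogram_row_count row k (histogram_row_count row k)

-- ===== LEMMAS AND PROOFS =====

-- Seeded prefix table: prefM f m l = the table of running f-folds of l starting from m.
def prefM (f : Int → Int → Int) (m : Int) : List Int → List Int
  | [] => []
  | x :: xs => f m x :: prefM f (f m x) xs

-- Reference count: number of prefixes (seeded with mn,mx) whose range stays ≤ k.
def cnt (k mn mx : Int) : List Int → Int
  | [] => 0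
  | x :: xs =>
    if (max mx x) - (min mn x) > k then 0 else 1 + cnt k (min mn x) (max mx x) xs

theorem pvBmins_go (l acc : List Int) (m : Int) (h : acc.getLast? = some m) :
    l.foldl (fun acc x =>
      acc ++ [match acc.getLast? with
              | none => x
              | some m => if x < m then x else m]) acc = acc ++ prefM min m l := by
  induction l generalizing acc m with
  | nil => simp [prefM]
  | cons x xs ih =>
    simp only [List.foldl, h, prefM]
    rw [ih (acc ++ [if x < m then x else m]) (min m x) (by simp [List.getLast?_append]; omega)]
    simp [min_def]
    split_ifs <;> omega

theorem pvBmaxs_go (l acc : List Int) (m : Int) (h : acc.getLast? = some m) :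
    l.foldl (fun acc x =>
      acc ++ [match acc.getLast? with
              | none => x
              | some m => if x > m then x else m]) acc = acc ++ prefM max m l := by
  induction l generalizing acc m with
  | nil => simp [prefM]
  | cons x xs ih =>
    simp only [List.foldl, h, prefM]
    rw [ih (acc ++ [if x > m then x else m]) (max m x) (by simp [List.getLast?_append]; omega)]
    simp [max_def]
    split_ifs <;> omega

theorem pvBmins_cons (h : Int) (t : List Int) :
    pvBmins (h :: t) = h :: prefM min h t := by
  simpa [pvBmins, List.foldl] using pvBmins_go t [h] h rfl

theorem pvBmaxs_cons (h : Int) (t : List Int) :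
    pvBmaxs (h :: t) = h :: prefM max h t := by
  simpa [pvBmaxs, List.foldl] using pvBmaxs_go t [h] h rfl

-- A's loop computes count + cnt (given the invariant mn ≤ mx).
theorem pvAloop_cnt (k : Int) (t : List Int) :
    ∀ count mn mx : Int, mn ≤ mx →
      pvAloop k t count mn mx = count + cnt k mn mx t := by
  induction t with
  | nil => intro count mn mx _; simp [pvAloop, cnt]
  | cons x xs ih =>
    intro count mn mx hle
    have hmn : (if x < mn then x else mn) = min mn x := by simp [min_def]; omega
    have hmx : (if x < mn then mx else (if x > mx then x else mx)) = max mx x := by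
      simp [max_def]; omega
    simp only [pvAloop, cnt, hmn, hmx]
    split
    · simp
    · rw [ih (count + 1) (min mn x) (max mx x) (by omega)]; ring

-- B's search over the seeded tables also computes cnt.
theorem pvBsearch_cnt (k : Int) (t : List Int) :
    ∀ mn mx i : Int,
      (pvBsearch k (prefM min mn t) (prefM max mx t) i).getD (i + (t.length : Int)) =
        i + cnt k mn mx t := by
  induction t with
  | nil => intro mn mx i; simp [prefM, pvBsearch, cnt]
  | cons x xs ih =>
    intro mn mx i
    by_cases hc : (max mx x) - (min mn x) > k
    · simp [prefM, pvBsearch, cnt, hc]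
    · have hIH := ih (min mn x) (max mx x) (i + 1)
      simp only [prefM, pvBsearch, cnt, if_neg hc]
      rcases hb : pvBsearch k (prefM min (min mn x) xs) (prefM max (max mx x) xs) (i + 1) with
        _ | j <;> rw [hb] at hIH <;> simp at hIH ⊢ <;> omega

-- ===== VERDICT (by name: the statement is the Claim_ definition above) =====
theorem histogram_row_count_spec : Claim_equal_histogram_row_count := by
  intro row k _ hpre
  cases row with
  | nil => exact absurd rfl hpre
  | cons h t =>
    show histogram_row_count (h :: t) k = histogram_row_count_alt (h :: t) k
    have hA : histogram_row_count (h :: t) k = cnt k h h (h :: t) := by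
      simp only [histogram_row_count, PySem.List.pyGet?, PySem.List.pyIdx?]
      norm_num
      rw [pvAloop_cnt k (h :: t) 0 h h le_rfl]; ring
    have hB := pvBsearch_cnt k (h :: t) h h 0
    rw [hA]
    have e1 : pvBmins (h :: t) = prefM min h (h :: t) := by
      simp [pvBmins_cons, prefM]
    have e2 : pvBmaxs (h :: t) = prefM max h (h :: t) := by
      simp [pvBmaxs_cons, prefM]
    simp only [histogram_row_count_alt, e1, e2]
    rcases hb : pvBsearch k (prefM min h (h :: t)) (prefM max h (h :: t)) 0 with _ | j <;>
      rw [hb] at hB <;> simp at hB ⊢ <;> omega
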